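-- pv_equiv track=rewrite | github.com/joaoabreu5/PL-TPCs | TPC1/TPC1.py | dist_idade
-- ===== SOURCE A (Python) =====
-- def dist_idade(data):
--     dist_idade = dict()
--     x1_idade_min = 30
--     x1_idade_max = None
--
--     for tuplo in data:
--         idade = tuplo[0]
--         int_idade = (idade//5*5, (idade//5+1)*5-1)
--         if int_idade not in dist_idade:
--             dist_idade[int_idade] = 1
--         else:
--             dist_idade[int_idade] += 1
--
--         if int_idade[0] < x1_idade_min:
--             x1_idade_min = int_idade[0]
--
--         if x1_idade_max is None:
--             x1_idade_max = int_idade[0]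
--         elif int_idade[0] > x1_idade_max:
--             x1_idade_max = int_idade[0]
--
--     if x1_idade_max is not None:
--         i = x1_idade_min
--         while i<=x1_idade_max:
--             if (i,i+4) not in dist_idade:
--                 dist_idade[(i,i+4)] = 0
--             i+=5
--
--     return dict(sorted(dist_idade.items()))
-- ===== SOURCE B (Python) =====
-- def dist_idade(data):
--     lows = sorted(t[0] // 5 * 5 for t in data)
--     if not lows:
--         return {}
--     lo = min(30, lows[0])
--     hi = lows[-1]
--     out = {}
--     i = lo
--     j = 0
--     n = len(lows)
--     while i <= hi:
--         c = 0
--         while j < n and lows[j] == i: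
--             c += 1
--             j += 1
--         out[(i, i + 4)] = c
--         i += 5
--     return out
-- ===== Notes on version B (the rewrite author's own statement) =====
-- stated objective: alternative
-- what changed: B replaces A's hash-dict counting with inline min/max tracking, gap-filling while loop and final sort by a sort-then-scan algorithm: it sorts the bucket lower bounds once, takes the bounds from the ends of the sorted list, and emits the result in one merged scan that reads each bucket's count as a run length via an advancing pointer, so no counting dict, no zero-fill pass and no final sort exist.
import Mathlib
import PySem

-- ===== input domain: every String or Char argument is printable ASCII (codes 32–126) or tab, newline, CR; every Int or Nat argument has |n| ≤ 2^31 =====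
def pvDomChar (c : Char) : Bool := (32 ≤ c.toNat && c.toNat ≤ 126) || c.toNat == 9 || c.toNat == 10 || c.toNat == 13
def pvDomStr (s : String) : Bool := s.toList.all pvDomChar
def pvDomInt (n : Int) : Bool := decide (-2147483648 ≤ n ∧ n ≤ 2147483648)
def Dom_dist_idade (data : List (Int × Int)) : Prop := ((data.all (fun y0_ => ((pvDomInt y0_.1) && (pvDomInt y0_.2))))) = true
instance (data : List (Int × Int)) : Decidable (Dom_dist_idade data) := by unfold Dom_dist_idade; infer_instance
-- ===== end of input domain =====

-- B replaces A's dict counting + min/max sentinel tracking + gap-filling loop + final sort by sort-then-scan: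
-- sort the 5-floored bucket lows once, read the bounds off the ends of the sorted list, and emit the buckets in
-- one merged scan whose counts are run lengths read by an advancing pointer (no counting dict, no fill, no sort at the end).

-- ===== PORT A =====
-- one iteration of A's 'for tuplo in data' loop; state = (dist_idade, x1_idade_min, x1_idade_max)
def dist_idade_loopA (st : PySem.Dict (Int × Int) Int × Int × Option Int) (tuplo : Int × Int) :
    PySem.Dict (Int × Int) Int × Int × Option Int :=
  let idade := tuplo.1
  let int_idade : Int × Int := (PySem.Int.floordiv idade 5 * 5, (PySem.Int.floordiv idade 5 + 1) * 5 - 1)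
  let d := if st.1.contains int_idade = false then st.1.insert int_idade 1
           else st.1.modify int_idade 0 (fun v => v + 1)
  let mn := if int_idade.1 < st.2.1 then int_idade.1 else st.2.1
  let mx := match st.2.2 with
            | none => some int_idade.1
            | some m => if int_idade.1 > m then some int_idade.1 else some m
  (d, mn, mx)

-- A's 'while i <= x1_idade_max' gap-filling loop
def dist_idade_fillA (d : PySem.Dict (Int × Int) Int) (i imax : Int) : PySem.Dict (Int × Int) Int :=
  if h : i ≤ imax then
    dist_idade_fillA (if d.contains (i, i + 4) = false then d.insert (i, i + 4) 0 else d) (i + 5) imax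
  else d
termination_by (imax + 5 - i).toNat
decreasing_by omega

def dist_idade (data : List (Int × Int)) : List (Int × Int × Int) :=
  let st := data.foldl dist_idade_loopA (PySem.Dict.empty, 30, none)
  let d := match st.2.2 with
           | none => st.1
           | some m => dist_idade_fillA st.1 st.2.1 m
  -- dict(sorted(d.items())): Python compares the item tuples lexicographically; the dict's keys are unique,
  -- so the comparison is decided by the key pair (value components are never reached): sorted2 on the two
  -- key components is exact here.  ((a,b),c) is flattened to (a,b,c) per the tuple convention.
  (PySem.List.sorted2 d.items (fun p => p.1.1) (fun p => p.1.2)).map (fun p => (p.1.1, p.1.2, p.2))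

-- ===== PORT B =====
-- B's inner 'while j < n and lows[j] == i: c += 1; j += 1' run scan: the index j into the sorted list is
-- represented by the remaining suffix; returns (c, remaining suffix after the run).
def dist_idade_runB (i : Int) : List Int → Int × List Int
  | [] => (0, [])
  | x :: xs =>
    if x = i then
      let p := dist_idade_runB i xs
      (p.1 + 1, p.2)
    else (0, x :: xs)

-- B's outer 'while i <= hi' scan emitting each bucket with its run-length count
def dist_idade_loopB (hi : Int) (i : Int) (rem : List Int) (out : PySem.Dict (Int × Int) Int) :
    PySem.Dict (Int × Int) Int :=
  if h : i ≤ hi then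
    let p := dist_idade_runB i rem
    dist_idade_loopB hi (i + 5) p.2 (out.insert (i, i + 4) p.1)
  else out
termination_by (hi + 5 - i).toNat
decreasing_by omega

def dist_idade_alt (data : List (Int × Int)) : List (Int × Int × Int) :=
  let lows := PySem.List.sorted (data.map (fun t => PySem.Int.floordiv t.1 5 * 5)) (fun x => x) false
  match lows with
  | [] => []                                             -- 'if not lows: return {}'
  | l0 :: tl =>
    let lo := min 30 l0                                  -- min(30, lows[0])
    let hi := (l0 :: tl).getLast (List.cons_ne_nil _ _)  -- lows[-1] on the known-nonempty list
    (dist_idade_loopB hi lo (l0 :: tl) PySem.Dict.empty).items.map (fun p => (p.1.1, p.1.2, p.2))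

-- ===== PRECONDITION & SPEC =====
def Spec_dist_idade (data : List (Int × Int)) (out : List (Int × Int × Int)) : Prop := out = dist_idade_alt data
instance (data : List (Int × Int)) (out : List (Int × Int × Int)) : Decidable (Spec_dist_idade data out) := by unfold Spec_dist_idade; infer_instance

-- ===== CLAIM (what is proved, stated in full; the proofs are below) =====
def Claim_equal_dist_idade : Prop := ∀ (data : List (Int × Int)), Dom_dist_idade data → Spec_dist_idade data (dist_idade data)

-- ===== LEMMAS AND PROOFS =====

-- the bucket lower bound and the bucket key of one tuple
def pvLow (t : Int × Int) : Int := PySem.Int.floordiv t.1 5 * 5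
def pvKey (t : Int × Int) : Int × Int := (pvLow t, pvLow t + 4)

lemma pv_keyA_eq (t : Int × Int) :
    (PySem.Int.floordiv t.1 5 * 5, (PySem.Int.floordiv t.1 5 + 1) * 5 - 1) = pvKey t := by
  simp only [pvKey, pvLow, Prod.mk.injEq]
  exact ⟨trivial, by ring⟩

lemma pv_five_dvd_low (t : Int × Int) : (5 : Int) ∣ pvLow t := ⟨PySem.Int.floordiv t.1 5, by rw [pvLow]; ring⟩

-- one iteration of A's loop, with the three accumulators named
lemma pv_stepA (st : PySem.Dict (Int × Int) Int × Int × Option Int) (t : Int × Int) :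
    dist_idade_loopA st t =
      (st.1.modify (pvKey t) 0 (fun v => v + 1), min st.2.1 (pvLow t),
       match st.2.2 with
       | none => some (pvLow t)
       | some m => some (max m (pvLow t))) := by
  obtain ⟨d, a, o⟩ := st
  unfold dist_idade_loopA
  dsimp only
  simp only [pv_keyA_eq]
  simp only [show ∀ u : Int × Int, PySem.Int.floordiv u.1 5 * 5 = pvLow u from fun _ => rfl]
  simp only [pvKey]
  refine congrArg₂ Prod.mk ?_ (congrArg₂ Prod.mk ?_ ?_)
  · by_cases hc : d.contains (pvLow t, pvLow t + 4) = false
    · rw [if_pos hc]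
      show _ = d.insert (pvLow t, pvLow t + 4) ((d.getD (pvLow t, pvLow t + 4) 0) + 1)
      rw [PySem.Dict.getD_of_not_contains d 0 hc]
      norm_num
    · rw [if_neg hc]
  · show (if pvLow t < a then pvLow t else a) = min a (pvLow t)
    rw [min_def]; split_ifs <;> omega
  · cases o with
    | none => rfl
    | some m =>
      show (if pvLow t > m then some (pvLow t) else some m) = some (max m (pvLow t))
      rcases lt_or_ge m (pvLow t) with h | h
      · rw [if_pos h, max_eq_right h.le]
      · rw [if_neg (by omega), max_eq_left h]

-- A's combined fold splits into its three independent accumulators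
lemma pv_loopA_split (data : List (Int × Int)) (d : PySem.Dict (Int × Int) Int) (a : Int) (o : Option Int) :
    data.foldl dist_idade_loopA (d, a, o) =
      (data.foldl (fun d t => d.modify (pvKey t) 0 (fun v => v + 1)) d,
       data.foldl (fun a t => min a (pvLow t)) a,
       data.foldl (fun o t => match o with
                   | none => some (pvLow t)
                   | some m => some (max m (pvLow t))) o) := by
  induction data generalizing d a o with
  | nil => rfl
  | cons t rest ih =>
    simp only [List.foldl_cons]
    rw [pv_stepA, ih]

-- fold min with an extra initial element
lemma pv_foldl_min_init (l : List Int) (a b : Int) :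
    l.foldl min (min a b) = min a (l.foldl min b) := by
  induction l generalizing b with
  | nil => rfl
  | cons c l ih => simpa [min_assoc] using ih (min b c)

-- the option-max fold over a nonempty prefix
lemma pv_foldl_optmax (l : List (Int × Int)) (m : Int) :
    l.foldl (fun o t => match o with
             | none => some (pvLow t)
             | some m => some (max m (pvLow t))) (some m) =
      some (l.foldl (fun a t => max a (pvLow t)) m) := by
  induction l generalizing m with
  | nil => rfl
  | cons t l ih => simpa using ih (max m (pvLow t))

-- pyRange with step 5: nil and cons forms
lemma pv_pyRange5_nil {i imax : Int} (h : imax < i) : PySem.List.pyRange i (imax + 1) 5 = [] := by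
  rw [PySem.List.pyRange_of_pos i (imax + 1) (by norm_num)]
  rw [if_neg (by omega)]; rfl

lemma pv_pyRange5_cons {i imax : Int} (h : i ≤ imax) :
    PySem.List.pyRange i (imax + 1) 5 = i :: PySem.List.pyRange (i + 5) (imax + 1) 5 := by
  rw [PySem.List.pyRange_of_pos i (imax + 1) (by norm_num),
      PySem.List.pyRange_of_pos (i + 5) (imax + 1) (by norm_num)]
  rw [if_pos (by omega)]
  by_cases h5 : i + 5 < imax + 1
  · rw [if_pos h5]
    rw [show ((imax + 1 - i + 5 - 1) / 5).toNat = ((imax + 1 - (i + 5) + 5 - 1) / 5).toNat + 1 by omega]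
    rw [List.range_succ_eq_map, List.map_cons, List.map_map]
    refine congrArg₂ List.cons (by norm_num) ?_
    apply List.map_congr_left; intro k _; simp only [Function.comp_apply]; push_cast; ring
  · rw [if_neg h5]
    rw [show ((imax + 1 - i + 5 - 1) / 5).toNat = 1 by omega]
    simp

-- A's fill loop is a setdefault fold over the 5-step range
lemma pv_fillA_eq (d : PySem.Dict (Int × Int) Int) (i imax : Int) :
    dist_idade_fillA d i imax =
      (PySem.List.pyRange i (imax + 1) 5).foldl (fun d j => d.setdefault (j, j + 4) 0) d := by
  by_cases h : i ≤ imax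
  · rw [pv_pyRange5_cons h, List.foldl_cons, dist_idade_fillA, dif_pos h, pv_fillA_eq]
    congr 1
    by_cases hc : d.contains (i, i + 4) = false
    · rw [if_pos hc, PySem.Dict.setdefault_of_not_contains d _ hc]
    · rw [if_neg hc, PySem.Dict.setdefault_of_contains d _ (by revert hc; cases d.contains (i, i + 4) <;> simp)]
  · rw [pv_pyRange5_nil (by omega), dist_idade_fillA, dif_neg h]; rfl
termination_by (imax + 5 - i).toNat
decreasing_by omega

-- a setdefault-with-0 fold never changes a getD-with-0 lookup
lemma pv_setdefault_fold_getD (l : List Int) (d : PySem.Dict (Int × Int) Int) (k : Int × Int) :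
    (l.foldl (fun d j => d.setdefault (j, j + 4) 0) d).getD k 0 = d.getD k 0 := by
  induction l generalizing d with
  | nil => rfl
  | cons j l ih =>
    rw [List.foldl_cons, ih]
    by_cases hk : k = (j, j + 4)
    · subst hk; exact PySem.Dict.getD_setdefault_self d _ 0 0
    · rw [PySem.Dict.getD_eq_get?_getD, PySem.Dict.get?_setdefault_of_ne d 0 hk,
          ← PySem.Dict.getD_eq_get?_getD]

-- keys through the setdefault fold
lemma pv_setdefault_fold_keys (l : List Int) (d : PySem.Dict (Int × Int) Int) :
    (l.foldl (fun d j => d.setdefault (j, j + 4) 0) d).keys =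
      PySem.Set.update d.keys (l.map (fun j => (j, j + 4))) := by
  induction l generalizing d with
  | nil => rfl
  | cons j l ih =>
    rw [List.foldl_cons, ih]
    simp only [List.map_cons, PySem.Set.update, List.foldl_cons]
    congr 1
    rw [PySem.Dict.keys_setdefault, PySem.Set.add_eq_ite]
    by_cases hc : d.contains (j, j + 4) = true
    · rw [if_pos hc, if_pos ((PySem.Dict.contains_iff_mem_keys d _).mp hc)]
    · rw [if_neg hc, if_neg (fun hm => hc ((PySem.Dict.contains_iff_mem_keys d _).mpr hm))]

-- B's bucket bounds, range, and the canonical result list (proof-only helpers)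
def pvLo (t0 : Int × Int) (rest : List (Int × Int)) : Int :=
  min 30 ((rest.map pvLow).foldl min (pvLow t0))
def pvHi (t0 : Int × Int) (rest : List (Int × Int)) : Int :=
  (rest.map pvLow).foldl max (pvLow t0)
def pvRng (t0 : Int × Int) (rest : List (Int × Int)) : List Int :=
  PySem.List.pyRange (pvLo t0 rest) (pvHi t0 rest + 1) 5
def pvRngK (t0 : Int × Int) (rest : List (Int × Int)) : List (Int × Int) :=
  (pvRng t0 rest).map (fun j => (j, j + 4))
def pvYs (t0 : Int × Int) (rest : List (Int × Int)) : List ((Int × Int) × Int) :=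
  (pvRngK t0 rest).map (fun k => (k, (List.count k ((t0 :: rest).map pvKey) : Int)))

lemma pv_dvd_lo (t0 : Int × Int) (rest : List (Int × Int)) : (5 : Int) ∣ pvLo t0 rest := by
  have hm : (5 : Int) ∣ (rest.map pvLow).foldl min (pvLow t0) := by
    rcases PySem.List.foldl_min_mem (rest.map pvLow) (pvLow t0) with h | h
    · rw [h]; exact pv_five_dvd_low t0
    · obtain ⟨t, _, ht⟩ := List.mem_map.mp h; rw [← ht]; exact pv_five_dvd_low t
  rw [pvLo, min_def]; split_ifs with h
  · exact ⟨6, rfl⟩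
  · exact hm

lemma pv_low_mem_rng (t0 : Int × Int) (rest : List (Int × Int)) (t : Int × Int)
    (ht : t ∈ t0 :: rest) : pvLow t ∈ pvRng t0 rest := by
  rw [pvRng, PySem.List.mem_pyRange_iff_of_pos (by norm_num)]
  have hub : pvLow t ≤ pvHi t0 rest := by
    rcases List.mem_cons.mp ht with rfl | ht'
    · exact (PySem.List.le_foldl_max (rest.map pvLow) (pvLow t)).1
    · exact (PySem.List.le_foldl_max (rest.map pvLow) (pvLow t0)).2 _ (List.mem_map_of_mem ht')
  have hlb : pvLo t0 rest ≤ pvLow t := by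
    refine le_trans (min_le_right _ _) ?_
    rcases List.mem_cons.mp ht with rfl | ht'
    · exact (PySem.List.foldl_min_le (rest.map pvLow) (pvLow t)).1
    · exact (PySem.List.foldl_min_le (rest.map pvLow) (pvLow t0)).2 _ (List.mem_map_of_mem ht')
  exact ⟨hlb, by omega, dvd_sub (pv_five_dvd_low t) (pv_dvd_lo t0 rest)⟩

lemma pv_key_mem_rngK (t0 : Int × Int) (rest : List (Int × Int)) :
    ∀ k ∈ (t0 :: rest).map pvKey, k ∈ pvRngK t0 rest := by
  intro k hk
  obtain ⟨t, ht, rfl⟩ := List.mem_map.mp hk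
  exact List.mem_map.mpr ⟨pvLow t, pv_low_mem_rng t0 rest t ht, rfl⟩

lemma pv_rng_pairwise (t0 : Int × Int) (rest : List (Int × Int)) :
    (pvRng t0 rest).Pairwise (· < ·) := by
  rw [pvRng, PySem.List.pyRange_of_pos _ _ (by norm_num)]
  exact List.Pairwise.map _ (fun a b h => by omega) List.pairwise_lt_range

lemma pv_rngK_nodup (t0 : Int × Int) (rest : List (Int × Int)) : (pvRngK t0 rest).Nodup :=
  List.Nodup.map (fun a b h => by simpa using congrArg Prod.fst h) (pv_rng_pairwise t0 rest).nodup

lemma pv_ys_pairwise (t0 : Int × Int) (rest : List (Int × Int)) :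
    (pvYs t0 rest).Pairwise (fun a b => a.1.1 < b.1.1) := by
  rw [pvYs, pvRngK, List.map_map]
  exact List.Pairwise.map _ (fun a b h => by simpa using h) (pv_rng_pairwise t0 rest)

-- sorted2 machinery: its insertion keeps the list sorted by the primary key,
-- and a strictly k1-increasing rearrangement is THE sorted2 result
lemma pv_insertBy_pairwise {α : Type} (k1 k2 : α → Int) (x : α) (acc : List α)
    (h : acc.Pairwise (fun a b => k1 a ≤ k1 b)) :
    (PySem.List.insertBy
      (fun a b => decide (k1 a < k1 b) || (!decide (k1 b < k1 a) && decide (k2 a < k2 b))) x acc).Pairwise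
      (fun a b => k1 a ≤ k1 b) := by
  induction acc with
  | nil => simp [PySem.List.insertBy]
  | cons y ys ih =>
    rw [List.pairwise_cons] at h
    by_cases hb : (decide (k1 x < k1 y) || (!decide (k1 y < k1 x) && decide (k2 x < k2 y))) = true
    · rw [PySem.List.insertBy, if_pos hb]
      have hxy : k1 x ≤ k1 y := by
        rcases Bool.or_eq_true_iff.mp hb with h1 | h1
        · exact le_of_lt (of_decide_eq_true h1)
        · have := (Bool.and_eq_true_iff.mp h1).1
          simp only [Bool.not_eq_true', decide_eq_false_iff_not, not_lt] at this
          exact this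
      exact List.pairwise_cons.mpr
        ⟨fun z hz => by
          rcases List.mem_cons.mp hz with rfl | hz'
          · exact hxy
          · exact hxy.trans (h.1 z hz'),
         List.pairwise_cons.mpr h⟩
    · rw [PySem.List.insertBy, if_neg hb]
      have hyx : k1 y ≤ k1 x := by
        simp only [Bool.or_eq_true, Bool.and_eq_true, Bool.not_eq_true', decide_eq_true_eq,
          decide_eq_false_iff_not, not_or, not_and] at hb
        exact le_of_not_gt hb.1
      exact List.pairwise_cons.mpr
        ⟨fun z hz => by
          rcases (PySem.List.insertBy_mem_iff _ x z ys).mp hz with rfl | hz'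
          · exact hyx
          · exact h.1 z hz',
         ih h.2⟩

lemma pv_sorted2_pairwise {α : Type} (xs : List α) (k1 k2 : α → Int) :
    (PySem.List.sorted2 xs k1 k2 false).Pairwise (fun a b => k1 a ≤ k1 b) := by
  show (xs.foldl (fun acc x => PySem.List.insertBy
      (fun a b => decide (k1 a < k1 b) || (!decide (k1 b < k1 a) && decide (k2 a < k2 b))) x acc)
      []).Pairwise (fun a b => k1 a ≤ k1 b)
  have : ∀ (l : List α) (acc : List α), acc.Pairwise (fun a b => k1 a ≤ k1 b) →
      (l.foldl (fun acc x => PySem.List.insertBy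
        (fun a b => decide (k1 a < k1 b) || (!decide (k1 b < k1 a) && decide (k2 a < k2 b))) x acc)
        acc).Pairwise (fun a b => k1 a ≤ k1 b) := by
    intro l
    induction l with
    | nil => exact fun acc h => h
    | cons x l ih => exact fun acc h => ih _ (pv_insertBy_pairwise k1 k2 x acc h)
  exact this xs [] (by simp)

lemma pv_pairwise_k1_inj {α : Type} (ys : List α) (k1 : α → Int)
    (hs : ys.Pairwise (fun a b => k1 a < k1 b)) :
    ∀ a ∈ ys, ∀ b ∈ ys, k1 a = k1 b → a = b := by
  induction ys with
  | nil => intro a ha; simp at ha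
  | cons y t ih =>
    rw [List.pairwise_cons] at hs
    intro a ha b hb heq
    rcases List.mem_cons.mp ha with rfl | ha' <;> rcases List.mem_cons.mp hb with rfl | hb'
    · rfl
    · exact absurd heq (by have := hs.1 b hb'; omega)
    · exact absurd heq (by have := hs.1 a ha'; omega)
    · exact ih hs.2 a ha' b hb' heq

lemma pv_sorted2_eq_of_perm {α : Type} (xs ys : List α) (k1 k2 : α → Int)
    (hp : ys.Perm xs) (hs : ys.Pairwise (fun a b => k1 a < k1 b)) :
    PySem.List.sorted2 xs k1 k2 false = ys := by
  refine List.Perm.eq_of_pairwise ?_ (pv_sorted2_pairwise xs k1 k2)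
    (hs.imp le_of_lt) ((PySem.List.sorted2_perm xs k1 k2 false).trans hp.symm)
  intro a b ha hb hab hba
  have ha' : a ∈ ys := hp.mem_iff.mpr ((PySem.List.sorted2_perm xs k1 k2 false).subset ha)
  exact pv_pairwise_k1_inj ys k1 hs a ha' b hb (le_antisymm hab hba)

-- ===== B's side =====

-- the last element of a ≤-sorted list bounds every element
lemma pv_le_getLast : ∀ (l : List Int) (h : l ≠ []), l.Pairwise (· ≤ ·) → ∀ x ∈ l, x ≤ l.getLast h := by
  intro l
  induction l with
  | nil => intro h; exact absurd rfl h
  | cons a t ih =>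
    intro _ hp x hx
    rw [List.pairwise_cons] at hp
    cases t with
    | nil =>
      simp only [List.mem_singleton] at hx
      subst hx
      exact le_of_eq (List.getLast_singleton _).symm
    | cons b u =>
      rw [List.getLast_cons (List.cons_ne_nil _ _)]
      rcases List.mem_cons.mp hx with rfl | hx'
      · exact le_trans (hp.1 _ (List.getLast_mem _)) (le_refl _)
      · exact ih (List.cons_ne_nil _ _) hp.2 x hx'

-- the inner run scan: on a ≤-sorted list with all elements ≥ i it takes exactly the i-run
lemma pv_runB_spec (i : Int) (rem : List Int) (hs : rem.Pairwise (· ≤ ·)) (hlb : ∀ x ∈ rem, i ≤ x) :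
    (dist_idade_runB i rem).1 = (rem.count i : Int) ∧
    (dist_idade_runB i rem).2.Sublist rem ∧
    (∀ x ∈ (dist_idade_runB i rem).2, i < x) ∧
    (∀ j : Int, i < j → (dist_idade_runB i rem).2.count j = rem.count j) := by
  induction rem with
  | nil => exact ⟨rfl, List.Sublist.refl _, by intro x hx; simp [dist_idade_runB] at hx, fun _ _ => rfl⟩
  | cons x xs ih =>
    rw [List.pairwise_cons] at hs
    by_cases hx : x = i
    · subst hx
      obtain ⟨h1, h2, h3, h4⟩ := ih hs.2 (fun y hy => hlb y (List.mem_cons_of_mem _ hy))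
      rw [dist_idade_runB, if_pos rfl]
      refine ⟨?_, h2.trans (List.sublist_cons_self _ _), h3, ?_⟩
      · dsimp only; rw [h1, List.count_cons_self]; push_cast; ring
      · intro j hj
        dsimp only; rw [h4 j hj, List.count_cons_of_ne (by omega)]
    · have hgt : ∀ y ∈ x :: xs, i < y := by
        intro y hy
        rcases List.mem_cons.mp hy with rfl | hy'
        · exact lt_of_le_of_ne (hlb y (List.mem_cons_self)) (fun h => hx h.symm)
        · exact lt_of_lt_of_le (lt_of_le_of_ne (hlb x List.mem_cons_self) (fun h => hx h.symm)) (hs.1 y hy')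
      rw [dist_idade_runB, if_neg hx]
      refine ⟨?_, List.Sublist.refl _, hgt, fun _ _ => rfl⟩
      dsimp only
      rw [List.count_eq_zero.mpr (fun hmem => absurd rfl (ne_of_gt (hgt i hmem)))]
      rfl

-- the outer scan appends one (bucket, run-length) item per range point
lemma pv_loopB_items (hi : Int) (i : Int) (rem : List Int) (out : PySem.Dict (Int × Int) Int)
    (hs : rem.Pairwise (· ≤ ·))
    (hmem : ∀ x ∈ rem, i ≤ x ∧ x ≤ hi ∧ (5 : Int) ∣ (x - i))
    (hout : ∀ j : Int, i ≤ j → out.contains (j, j + 4) = false) :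
    (dist_idade_loopB hi i rem out).items =
      out.items ++ (PySem.List.pyRange i (hi + 1) 5).map (fun j => ((j, j + 4), (rem.count j : Int))) := by
  by_cases h : i ≤ hi
  · obtain ⟨h1, h2, h3, h4⟩ := pv_runB_spec i rem hs (fun x hx => (hmem x hx).1)
    rw [dist_idade_loopB, dif_pos h]
    rw [pv_loopB_items hi (i + 5) (dist_idade_runB i rem).2 _
          (hs.sublist h2)
          (by
            intro x hx
            obtain ⟨_, hub, hd⟩ := hmem x (h2.subset hx)
            exact ⟨by have := h3 x hx; omega, hub, by omega⟩)
          (by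
            intro j hj
            rw [PySem.Dict.contains_insert]
            have hne : ((j, j + 4) == (i, i + 4)) = false := by
              rw [beq_eq_false_iff_ne]
              intro he
              have := congrArg Prod.fst he
              simp only at this
              omega
            rw [hne, Bool.false_or]
            exact hout j (by omega))]
    rw [PySem.Dict.items_insert_of_not_contains _ _ (hout i (le_refl i))]
    rw [pv_pyRange5_cons h, List.map_cons, h1]
    rw [List.append_assoc, List.cons_append, List.nil_append]
    congr 2
    apply List.map_congr_left
    intro j hj
    rw [PySem.List.mem_pyRange_iff_of_pos (by norm_num)] at hj
    rw [h4 j (by omega)]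
  · rw [dist_idade_loopB, dif_neg h, pv_pyRange5_nil (by omega), List.map_nil, List.append_nil]
termination_by (hi + 5 - i).toNat
decreasing_by omega

-- counting a bucket key over pvKey equals counting its low over pvLow
lemma pv_count_key_eq (l : List (Int × Int)) (j : Int) :
    (l.map pvKey).count (j, j + 4) = (l.map pvLow).count j := by
  simp only [List.count_eq_countP, List.countP_map]
  apply List.countP_congr
  intro t _
  simp only [Function.comp_apply, pvKey, beq_iff_eq, Prod.mk.injEq]
  constructor
  · rintro ⟨h, -⟩; exact h
  · rintro rfl; exact ⟨rfl, rfl⟩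

lemma pv_B_eq (t0 : Int × Int) (rest : List (Int × Int)) :
    dist_idade_alt (t0 :: rest) = (pvYs t0 rest).map (fun p => (p.1.1, p.1.2, p.2)) := by
  have hmap : (t0 :: rest).map (fun t => PySem.Int.floordiv t.1 5 * 5) = (t0 :: rest).map pvLow := rfl
  rcases hS : PySem.List.sorted ((t0 :: rest).map pvLow) (fun x => x) false with _ | ⟨l0, tl⟩
  · exact absurd ((PySem.List.sorted_eq_nil_iff _ _ _).mp hS) (by simp)
  · have hperm : (l0 :: tl).Perm ((t0 :: rest).map pvLow) := hS ▸ PySem.List.sorted_perm _ _ _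
    have hpw : (l0 :: tl).Pairwise (· ≤ ·) := by
      have := PySem.List.sorted_pairwise ((t0 :: rest).map pvLow) (fun x => x)
      rw [hS] at this; exact this
    have hhead : ∀ y ∈ (t0 :: rest).map pvLow, l0 ≤ y :=
      PySem.List.key_head_sorted_le ((t0 :: rest).map pvLow) (fun x => x) hS
    -- l0 is the fold-min of the lows
    have hl0 : min 30 l0 = pvLo t0 rest := by
      have hm_mem : (rest.map pvLow).foldl min (pvLow t0) ∈ (t0 :: rest).map pvLow := by
        rcases PySem.List.foldl_min_mem (rest.map pvLow) (pvLow t0) with h | h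
        · rw [h]; simp [List.map_cons]
        · exact List.mem_cons_of_mem _ h
      have hl0_mem : l0 ∈ (t0 :: rest).map pvLow := hperm.subset List.mem_cons_self
      have h1 : l0 ≤ (rest.map pvLow).foldl min (pvLow t0) := hhead _ hm_mem
      have h2 : (rest.map pvLow).foldl min (pvLow t0) ≤ l0 := by
        obtain ⟨t, ht, rfl⟩ := List.mem_map.mp hl0_mem
        rcases List.mem_cons.mp ht with rfl | ht'
        · exact (PySem.List.foldl_min_le (rest.map pvLow) (pvLow t)).1
        · exact (PySem.List.foldl_min_le (rest.map pvLow) (pvLow t0)).2 _ (List.mem_map_of_mem ht')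
      rw [pvLo]; omega
    -- the last element is the fold-max of the lows
    have hlast : (l0 :: tl).getLast (List.cons_ne_nil _ _) = pvHi t0 rest := by
      have hmax : PySem.List.max? ((t0 :: rest).map pvLow) (fun y => y) = some (pvHi t0 rest) := by
        rw [List.map_cons, PySem.List.max?_id_cons]; rfl
      have hub : ∀ y ∈ (t0 :: rest).map pvLow, y ≤ pvHi t0 rest := by
        intro y hy; exact PySem.List.max?_isMax hmax y hy
      have hmem : pvHi t0 rest ∈ (t0 :: rest).map pvLow := PySem.List.max?_mem hmax
      have hlast_mem : (l0 :: tl).getLast (List.cons_ne_nil _ _) ∈ (t0 :: rest).map pvLow :=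
        hperm.subset (List.getLast_mem _)
      have h1 : (l0 :: tl).getLast (List.cons_ne_nil _ _) ≤ pvHi t0 rest := hub _ hlast_mem
      have h2 : pvHi t0 rest ≤ (l0 :: tl).getLast (List.cons_ne_nil _ _) :=
        pv_le_getLast (l0 :: tl) (List.cons_ne_nil _ _) hpw _ (hperm.mem_iff.mpr hmem)
      omega
    -- unfold B and apply the loop lemma
    simp only [dist_idade_alt]
    rw [hmap, hS]
    dsimp only
    rw [hl0, hlast]
    rw [pv_loopB_items (pvHi t0 rest) (pvLo t0 rest) (l0 :: tl) PySem.Dict.empty hpw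
          (by
            intro x hx
            have hxL : x ∈ (t0 :: rest).map pvLow := hperm.subset hx
            obtain ⟨t, ht, rfl⟩ := List.mem_map.mp hxL
            have hrng := pv_low_mem_rng t0 rest t ht
            rw [pvRng, PySem.List.mem_pyRange_iff_of_pos (by norm_num)] at hrng
            exact ⟨hrng.1, by omega, hrng.2.2⟩)
          (fun j _ => PySem.Dict.contains_empty _)]
    rw [show (PySem.Dict.empty : PySem.Dict (Int × Int) Int).items = [] from rfl, List.nil_append]
    simp only [pvYs, pvRngK, pvRng, List.map_map]
    apply List.map_congr_left
    intro j hj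
    dsimp only [Function.comp_apply]
    rw [show ((l0 :: tl).count j : Int) = (((t0 :: rest).map pvLow).count j : Int) by
          rw [hperm.count_eq]]
    rw [← pv_count_key_eq]
  -- the first branch (sorted = []) never occurs: a map of a cons is never nil

-- ===== A's side =====
lemma pv_A_eq (t0 : Int × Int) (rest : List (Int × Int)) :
    dist_idade (t0 :: rest) = (pvYs t0 rest).map (fun p => (p.1.1, p.1.2, p.2)) := by
  unfold dist_idade
  rw [pv_loopA_split]
  dsimp only
  have hd1 : (t0 :: rest).foldl (fun d t => d.modify (pvKey t) 0 (fun v => v + 1)) PySem.Dict.empty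
      = PySem.Dict.counter ((t0 :: rest).map pvKey) := by
    rw [PySem.Dict.counter_eq_foldl, List.foldl_map]
  have hmn : (t0 :: rest).foldl (fun a t => min a (pvLow t)) 30 = pvLo t0 rest := by
    have h1 : (t0 :: rest).foldl (fun a t => min a (pvLow t)) 30
        = ((t0 :: rest).map pvLow).foldl min 30 := by rw [List.foldl_map]
    rw [h1, List.map_cons, List.foldl_cons, pv_foldl_min_init, pvLo]
  have hmx : (t0 :: rest).foldl (fun o t => match o with
        | none => some (pvLow t)
        | some m => some (max m (pvLow t))) none = some (pvHi t0 rest) := by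
    rw [List.foldl_cons]
    show List.foldl _ (some (pvLow t0)) rest = _
    rw [pv_foldl_optmax]
    have : rest.foldl (fun a t => max a (pvLow t)) (pvLow t0)
        = (rest.map pvLow).foldl max (pvLow t0) := by rw [List.foldl_map]
    rw [this, pvHi]
  rw [hd1, hmn, hmx]
  dsimp only
  rw [pv_fillA_eq]
  have hrng : PySem.List.pyRange (pvLo t0 rest) (pvHi t0 rest + 1) 5 = pvRng t0 rest := rfl
  rw [hrng]
  set d2 := (pvRng t0 rest).foldl (fun d j => d.setdefault (j, j + 4) 0)
      (PySem.Dict.counter ((t0 :: rest).map pvKey)) with hd2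
  have hkeys : d2.keys = PySem.Set.update (PySem.Set.ofList ((t0 :: rest).map pvKey)) (pvRngK t0 rest) := by
    rw [hd2, pv_setdefault_fold_keys, PySem.Dict.keys_counter]; rfl
  have hnodup : d2.keys.Nodup := by
    rw [hkeys]; exact PySem.Set.nodup_update _ _ (PySem.Set.nodup_ofList _)
  have hgetD : ∀ k, d2.getD k 0 = (List.count k ((t0 :: rest).map pvKey) : Int) := by
    intro k
    rw [hd2, pv_setdefault_fold_getD, PySem.Dict.getD_counter]
  have hitems : d2.items = d2.keys.map (fun k => (k, (List.count k ((t0 :: rest).map pvKey) : Int))) := by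
    rw [PySem.Dict.items_eq_map_keys d2 hnodup 0]
    exact List.map_congr_left (fun k _ => by rw [hgetD k])
  have hperm : (pvYs t0 rest).Perm d2.items := by
    rw [hitems, pvYs]
    apply List.Perm.map
    apply (List.perm_ext_iff_of_nodup (pv_rngK_nodup t0 rest) hnodup).mpr
    intro k
    rw [hkeys, PySem.Set.mem_update, PySem.Set.mem_ofList]
    constructor
    · exact fun h => Or.inr h
    · rintro (h | h)
      · exact pv_key_mem_rngK t0 rest k (by simpa using h)
      · exact h
  rw [pv_sorted2_eq_of_perm d2.items (pvYs t0 rest) _ _ hperm (pv_ys_pairwise t0 rest)]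

theorem dist_idade_spec_aux (data : List (Int × Int)) :
    dist_idade data = dist_idade_alt data := by
  cases data with
  | nil => rfl
  | cons t0 rest => rw [pv_A_eq, pv_B_eq]

-- ===== VERDICT (by name: the statement is the Claim_ definition above) =====
theorem dist_idade_spec : Claim_equal_dist_idade := by
  intro data _
  unfold Spec_dist_idade
  exact dist_idade_spec_aux data
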